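-- pv_equiv track=rewrite | github.com/GMMario2023/DaSE-Introduction | Homework 10.py | contains_consecutive_substring
-- ===== SOURCE A (Python) =====
-- def contains_consecutive_substring(s):
--     char_count = {}
--
--     # 遍历输入字符串中的每个字符
--     for char in s:
--         # 如果字典中没有这个字符，添加它并设置计数为1
--         if char not in char_count:
--             char_count[char] = 1
--         else:
--             # 如果字符已经在字典中，增加计数
--             char_count[char] += 1
--
--         # 检查是否有两个或更多相同的字符
--         if char_count[char] >= 2:
--             return True
--
--     # 如果没有找到两个或更多相同的字符，返回False
--     return False
-- ===== SOURCE B (Python) =====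
-- def contains_consecutive_substring(s):
--     t = sorted(s)
--     return any(a == b for a, b in zip(t, t[1:]))
-- ===== Notes on version B (the rewrite author's own statement) =====
-- stated objective: alternative
-- what changed: Replaces the hash-counting single pass with early exit by sort-then-scan: sort the characters, then check whether any two adjacent sorted characters are equal (duplicates become adjacent after sorting).
import Mathlib
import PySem

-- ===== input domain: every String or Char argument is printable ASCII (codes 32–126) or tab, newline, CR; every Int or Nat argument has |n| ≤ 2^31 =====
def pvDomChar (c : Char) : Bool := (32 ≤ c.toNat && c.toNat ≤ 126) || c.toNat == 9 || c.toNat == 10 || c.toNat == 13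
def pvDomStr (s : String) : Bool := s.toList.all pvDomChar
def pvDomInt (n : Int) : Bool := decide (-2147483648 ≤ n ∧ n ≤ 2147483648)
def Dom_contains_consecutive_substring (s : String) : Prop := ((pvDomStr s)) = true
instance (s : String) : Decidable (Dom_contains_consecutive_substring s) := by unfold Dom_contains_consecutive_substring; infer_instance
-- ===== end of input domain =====

-- B replaces A's counting-dict pass with early exit by sort-then-scan: sort the characters
-- and test whether any two adjacent sorted characters are equal; objective: alternative.

-- ===== PORT A =====
-- the 'for char in s' loop with the counting dict and the early 'return True'
def pvALoop : List Char → PySem.Dict Char Int → Bool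
  | [], _ => false
  | c :: rest, d =>
    let d' := if (PySem.Dict.contains d c) = false
              then PySem.Dict.insert d c 1
              else PySem.Dict.modify d c 0 (· + 1)
    if 2 ≤ PySem.Dict.getD d' c 0 then true else pvALoop rest d'

def contains_consecutive_substring (s : String) : Bool :=
  pvALoop s.toList PySem.Dict.empty

-- ===== PORT B =====
-- t = sorted(s); any(a == b for a, b in zip(t, t[1:]))
def contains_consecutive_substring_alt (s : String) : Bool :=
  let t := PySem.List.sorted s.toList (fun c => c) false
  (t.zip (t.drop 1)).any (fun p => p.1 == p.2)

-- ===== PRECONDITION & SPEC =====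
def Spec_contains_consecutive_substring (s : String) (out : Bool) : Prop := out = contains_consecutive_substring_alt s
instance (s : String) (out : Bool) : Decidable (Spec_contains_consecutive_substring s out) := by unfold Spec_contains_consecutive_substring; infer_instance

-- ===== CLAIM (what is proved, stated in full; the proofs are below) =====
def Claim_equal_contains_consecutive_substring : Prop := ∀ (s : String), Dom_contains_consecutive_substring s → Spec_contains_consecutive_substring s (contains_consecutive_substring s)

-- ===== LEMMAS AND PROOFS =====

-- A's loop, with the dict recording exactly the (so far duplicate-free) seen characters, decides Nodup of seen ++ l
theorem pvALoop_eq (l : List Char) : ∀ (seen : List Char) (d : PySem.Dict Char Int),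
    seen.Nodup →
    (∀ c : Char, PySem.Dict.get? d c = if c ∈ seen then some 1 else none) →
    (pvALoop l d = !decide ((seen ++ l).Nodup)) := by
  induction l with
  | nil =>
    intro seen d hnd _
    simp [pvALoop, hnd]
  | cons c rest ih =>
    intro seen d hnd hinv
    by_cases hc : c ∈ seen
    · -- duplicate found: dict contains c with count 1, bumped to 2, return true
      have hget : PySem.Dict.get? d c = some 1 := by rw [hinv c]; simp [hc]
      have hcon : PySem.Dict.contains d c = true := by
        rw [PySem.Dict.contains_eq_isSome_get?, hget]; rfl
      have hgd : PySem.Dict.getD d c 0 = 1 :=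
        PySem.Dict.getD_of_get?_eq_some d 0 hget
      have : ¬ ((seen ++ c :: rest).Nodup) := by
        intro h
        exact (List.disjoint_of_nodup_append h) hc (List.mem_cons_self)
      simp [pvALoop, hcon, PySem.Dict.getD_modify_self, hgd, this]
    · -- fresh character: insert with count 1, recurse with seen ++ [c]
      have hget : PySem.Dict.get? d c = none := by rw [hinv c]; simp [hc]
      have hcon : PySem.Dict.contains d c = false := by
        rw [PySem.Dict.contains_eq_isSome_get?, hget]; rfl
      have hgd : PySem.Dict.getD (PySem.Dict.insert d c 1) c 0 = 1 := by
        simp [PySem.Dict.getD_insert_self]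
      have hnd' : (seen ++ [c]).Nodup := by
        simp only [List.nodup_append, List.nodup_cons, List.not_mem_nil, List.nodup_nil]
        refine ⟨hnd, by simp, ?_⟩
        intro a ha b hb
        simp only [List.mem_singleton] at hb
        subst hb
        intro h; exact hc (h ▸ ha)
      have hinv' : ∀ c' : Char,
          PySem.Dict.get? (PySem.Dict.insert d c 1) c' =
            if c' ∈ seen ++ [c] then some 1 else none := by
        intro c'
        by_cases hcc : c' = c
        · subst hcc; simp [PySem.Dict.get?_insert_self]
        · rw [PySem.Dict.get?_insert_of_ne d 1 hcc, hinv c']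
          simp [hcc]
      have := ih (seen ++ [c]) (PySem.Dict.insert d c 1) hnd' hinv'
      simp only [pvALoop, hcon]
      norm_num
      rw [this]
      simp

-- A decides Nodup of the character list
theorem portA_eq_nodup (s : String) :
    contains_consecutive_substring s = !decide (s.toList.Nodup) := by
  have := pvALoop_eq s.toList [] PySem.Dict.empty List.nodup_nil
    (by intro c; simp [PySem.Dict.get?_empty])
  simpa [contains_consecutive_substring] using this

-- On a ≤-ordered list, the adjacent-equality scan decides Nodup
theorem adjScan_eq_nodup : ∀ (l : List Char), l.Pairwise (· ≤ ·) →
    (l.zip (l.drop 1)).any (fun p => p.1 == p.2) = !decide l.Nodup := by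
  intro l
  induction l with
  | nil => intro _; simp
  | cons a r ih =>
    intro hp
    cases r with
    | nil => simp
    | cons b r' =>
      have hpt : (b :: r').Pairwise (· ≤ ·) := hp.tail
      have hab : a ≤ b := (List.pairwise_cons.mp hp).1 b List.mem_cons_self
      have hIH := ih hpt
      by_cases heq : a = b
      · subst heq
        have : ¬ ((a :: a :: r').Nodup) := by simp
        simp [List.zip, this]
      · have hlt : a < b := lt_of_le_of_ne hab heq
        have hnotmem : a ∉ b :: r' := by
          intro hm
          rcases List.mem_cons.mp hm with h | h
          · exact heq h
          · have : b ≤ a := (List.pairwise_cons.mp hpt).1 a h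
            exact absurd (lt_of_lt_of_le hlt this) (lt_irrefl a)
        have hzip : ((a :: b :: r').zip ((a :: b :: r').drop 1)).any (fun p => p.1 == p.2)
            = ((a == b) || ((b :: r').zip ((b :: r').drop 1)).any (fun p => p.1 == p.2)) := by
          simp [List.zip]
        rw [hzip, hIH]
        have : (a :: b :: r').Nodup ↔ (b :: r').Nodup := by
          constructor
          · exact fun h => h.tail
          · intro h; exact List.nodup_cons.mpr ⟨hnotmem, h⟩
        simp [heq, this]

-- B decides Nodup of the character list, too
theorem portB_eq_nodup (s : String) :
    contains_consecutive_substring_alt s = !decide (s.toList.Nodup) := by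
  unfold contains_consecutive_substring_alt
  have hp : (PySem.List.sorted s.toList (fun c => c) false).Pairwise (· ≤ ·) :=
    PySem.List.sorted_pairwise s.toList (fun c => c)
  have hperm : (PySem.List.sorted s.toList (fun c => c) false).Perm s.toList :=
    PySem.List.sorted_perm s.toList (fun c => c) false
  rw [adjScan_eq_nodup _ hp]
  simp [hperm.nodup_iff]

-- ===== VERDICT (by name: the statement is the Claim_ definition above) =====
theorem contains_consecutive_substring_spec : Claim_equal_contains_consecutive_substring := by
  intro s _
  unfold Spec_contains_consecutive_substring
  rw [portA_eq_nodup, portB_eq_nodup]
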